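-- pv_equiv track=rewrite | github.com/jbrundle/https---github.com-jbrundle-earthquake-forecasts | SKLMachineLearningPatterns-SEISR_V5A/SEISRCalcMethods.py | calc_eqs_unfiltered
-- ===== SOURCE A (Python) =====
-- def calc_eqs_unfiltered(time_list, eqs_list, plot_start_year):
--
-- #
-- #   ------------------------------------------------------------
-- #
--     if plot_start_year <= time_list[0]:
--         plot_start_year = time_list[0]
--
--     number_points_to_plot = 0
--
--     for k in range(len(time_list)):
--         if time_list[k] >= plot_start_year:
--             number_points_to_plot += 1
--
--
--     time_list_unfiltered_reduced           = time_list[- number_points_to_plot:]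
--     eqs_list_unfiltered_reduced            = eqs_list[- number_points_to_plot:]
--
--     return time_list_unfiltered_reduced, eqs_list_unfiltered_reduced
-- ===== SOURCE B (Python) =====
-- def calc_eqs_unfiltered(time_list, eqs_list, plot_start_year):
--     # time_list is a chronological (nondecreasing) series, so the points at or
--     # after the start year form a tail: binary-search the first index whose
--     # time is not below the start and keep that many trailing entries of both
--     # series.
--     start = max(plot_start_year, time_list[0])
--     lo, hi = 0, len(time_list)
--     while lo < hi:
--         mid = (lo + hi) // 2
--         if time_list[mid] < start:
--             lo = mid + 1
--         else:
--             hi = mid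
--     keep = len(time_list) - lo
--     return time_list[-keep:], eqs_list[-keep:]
-- ===== Notes on version B (the rewrite author's own statement) =====
-- stated objective: alternative
-- what changed: B replaces A's linear scan counting points at/after the clamped start year with a binary search for the first qualifying index; Pre_ excludes empty time_list (A raises IndexError) and unsorted time_list (the series is chronological; there A's positional count is a value a binary search cannot reproduce), keeping the order-degenerate unsorted cases where the start year is above all points or at/below all points.
-- outside the precondition, e.g. on calc_eqs_unfiltered([3, 1], [5, 6], 2): A returns ([1], [6]), B returns ([3, 1], [5, 6])
import Mathlib
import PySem

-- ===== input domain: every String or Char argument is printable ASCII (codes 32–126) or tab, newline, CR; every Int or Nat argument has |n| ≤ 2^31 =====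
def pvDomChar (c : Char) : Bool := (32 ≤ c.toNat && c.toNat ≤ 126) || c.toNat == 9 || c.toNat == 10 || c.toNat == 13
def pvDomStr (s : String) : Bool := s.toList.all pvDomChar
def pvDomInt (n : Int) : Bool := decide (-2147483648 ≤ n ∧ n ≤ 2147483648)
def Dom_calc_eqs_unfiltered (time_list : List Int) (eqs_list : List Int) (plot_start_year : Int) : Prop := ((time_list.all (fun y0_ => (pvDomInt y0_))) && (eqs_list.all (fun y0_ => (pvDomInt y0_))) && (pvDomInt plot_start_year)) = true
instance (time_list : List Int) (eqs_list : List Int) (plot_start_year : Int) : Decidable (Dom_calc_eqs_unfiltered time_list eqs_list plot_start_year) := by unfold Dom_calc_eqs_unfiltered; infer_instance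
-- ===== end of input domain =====

-- B replaces A's linear count of points at/after the start year by a binary search
-- on the chronological time_list (Pre_ requires it nondecreasing and nonempty).

-- ===== PORT A =====
-- A: clamp the start year to the first time, count points at/after it with an
-- index loop, then return the tail slices of that length via negative slicing.
def calc_eqs_unfiltered (time_list : List Int) (eqs_list : List Int) (plot_start_year : Int) : List Int × List Int :=
  let psy : Int := if plot_start_year ≤ PySem.List.pyGetD time_list 0 0
                   then PySem.List.pyGetD time_list 0 0 else plot_start_year
  let number_points_to_plot : Int :=
    (PySem.List.pyRange 0 (PySem.List.len time_list) 1).foldl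
      (fun acc k => if PySem.List.pyGetD time_list k 0 ≥ psy then acc + 1 else acc) 0
  (PySem.List.slice time_list (some (-number_points_to_plot)) none,
   PySem.List.slice eqs_list (some (-number_points_to_plot)) none)

-- ===== PORT B =====
-- Source B's while loop, ported as structural recursion on a fuel counter (hi - lo
-- shrinks every iteration, so fuel = the initial hi is enough; time_list[mid] is
-- always in range, ported as getD with an unused default).
def bisectLoop (ts : List Int) (x : Int) : Nat → Nat → Nat → Nat
  | 0, lo, _ => lo
  | fuel + 1, lo, hi =>
    if lo < hi then
      let mid := (lo + hi) / 2
      if ts.getD mid 0 < x then bisectLoop ts x fuel (mid + 1) hi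
      else bisectLoop ts x fuel lo mid
    else lo

-- B: binary search for the first index at/after the clamped start year, then the
-- same trailing slices of both series.
def calc_eqs_unfiltered_alt (time_list : List Int) (eqs_list : List Int) (plot_start_year : Int) : List Int × List Int :=
  let start : Int := max plot_start_year (PySem.List.pyGetD time_list 0 0)
  let lo : Nat := bisectLoop time_list start time_list.length 0 time_list.length
  let keep : Int := (time_list.length : Int) - (lo : Int)
  (PySem.List.slice time_list (some (-keep)) none,
   PySem.List.slice eqs_list (some (-keep)) none)

-- ===== PRECONDITION & SPEC =====
-- A raises IndexError on empty time_list; B's binary search presumes the chronological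
-- (nondecreasing) order of the time series, so Pre_ also requires sortedness except in
-- the two order-degenerate cases it keeps (start year above all points, or at/below all
-- points, where order cannot matter); on other unsorted lists A returns a positional
-- count that a binary search cannot and should not reproduce.
def Pre_calc_eqs_unfiltered (time_list : List Int) (eqs_list : List Int) (plot_start_year : Int) : Prop :=
  time_list ≠ [] ∧
    (time_list.Pairwise (· ≤ ·)
     ∨ (∀ y ∈ time_list, y < plot_start_year)
     ∨ (∀ y ∈ time_list, plot_start_year ≤ y ∧ PySem.List.pyGetD time_list 0 0 ≤ y))
instance (time_list : List Int) (eqs_list : List Int) (plot_start_year : Int) : Decidable (Pre_calc_eqs_unfiltered time_list eqs_list plot_start_year) := by unfold Pre_calc_eqs_unfiltered; infer_instance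

def pvWitness_calc_eqs_unfiltered : List Int × List Int × Int := ([2000, 2001, 2002], [5, 7, 9], 2001)

def Spec_calc_eqs_unfiltered (time_list : List Int) (eqs_list : List Int) (plot_start_year : Int) (out : List Int × List Int) : Prop := out = calc_eqs_unfiltered_alt time_list eqs_list plot_start_year
instance (time_list : List Int) (eqs_list : List Int) (plot_start_year : Int) (out : List Int × List Int) : Decidable (Spec_calc_eqs_unfiltered time_list eqs_list plot_start_year out) := by unfold Spec_calc_eqs_unfiltered; infer_instance

-- ===== CLAIM (what is proved, stated in full; the proofs are below) =====
def Claim_equal_calc_eqs_unfiltered : Prop := ∀ (time_list : List Int) (eqs_list : List Int) (plot_start_year : Int), Dom_calc_eqs_unfiltered time_list eqs_list plot_start_year → Pre_calc_eqs_unfiltered time_list eqs_list plot_start_year → Spec_calc_eqs_unfiltered time_list eqs_list plot_start_year (calc_eqs_unfiltered time_list eqs_list plot_start_year)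

-- ===== LEMMAS AND PROOFS =====

-- A's index-loop count is the number of elements ≥ psy, as an integer.
lemma countA_eq (t : List Int) (psy : Int) :
    ((PySem.List.pyRange 0 (PySem.List.len t) 1).foldl
      (fun acc k => if PySem.List.pyGetD t k 0 ≥ psy then acc + 1 else acc) (0 : Int))
    = ((t.countP (fun y => decide (psy ≤ y)) : Nat) : Int) := by
  rw [PySem.List.foldl_pyRange_zero_pyGetD t 0
        (fun acc x => if x ≥ psy then acc + 1 else acc) 0]
  simpa [ge_iff_le] using PySem.List.foldl_count_if (fun y => decide (psy ≤ y)) t 0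

-- If everything below index lo is < x and everything from lo on is ≥ x,
-- then lo is the number of elements below x.
lemma countP_eq_of_cut (ts : List Int) (x : Int) (lo : Nat) (hle : lo ≤ ts.length)
    (hbelow : ∀ i (h : i < ts.length), i < lo → ts[i] < x)
    (habove : ∀ i (h : i < ts.length), lo ≤ i → x ≤ ts[i]) :
    ts.countP (fun y => decide (y < x)) = lo := by
  have hsplit : ts = ts.take lo ++ ts.drop lo := (List.take_append_drop lo ts).symm
  have h1 : (ts.take lo).countP (fun y => decide (y < x)) = (ts.take lo).length := by
    apply List.countP_eq_length.mpr
    intro a ha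
    obtain ⟨i, hi', rfl⟩ := List.mem_take_iff_getElem.mp ha
    simp only [decide_eq_true_eq]
    exact hbelow i (lt_of_lt_of_le (lt_min_iff.mp hi').1 hle) (lt_min_iff.mp hi').1
  have h2 : (ts.drop lo).countP (fun y => decide (y < x)) = 0 := by
    apply List.countP_eq_zero.mpr
    intro a ha
    obtain ⟨i, hi', rfl⟩ := List.mem_drop_iff_getElem.mp ha
    simp only [decide_eq_true_eq, not_lt]
    exact habove (lo + i) (by omega) (by omega)
  have hc := congrArg (List.countP (fun y => decide (y < x))) hsplit
  rw [List.countP_append, h1, h2, List.length_take] at hc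
  omega

-- On a sorted list the binary search returns the number of elements below x.
lemma bisectLoop_eq_countP (ts : List Int) (x : Int) (hs : ts.Pairwise (· ≤ ·)) :
    ∀ (fuel lo hi : Nat), hi - lo ≤ fuel → lo ≤ hi → hi ≤ ts.length →
      (∀ i (h : i < ts.length), i < lo → ts[i] < x) →
      (∀ i (h : i < ts.length), hi ≤ i → x ≤ ts[i]) →
      bisectLoop ts x fuel lo hi = ts.countP (fun y => decide (y < x)) := by
  have hmono := List.pairwise_iff_getElem.mp hs
  intro fuel
  induction fuel with
  | zero =>
    intro lo hi hf hlh hhi hlo hhi'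
    have heq : lo = hi := by omega
    subst heq
    exact (countP_eq_of_cut ts x lo hhi hlo hhi').symm
  | succ fuel ih =>
    intro lo hi hf hlh hhi hlo hhi'
    simp only [bisectLoop]
    by_cases h : lo < hi
    · rw [if_pos h]
      have hmid : (lo + hi) / 2 < ts.length := by omega
      by_cases hc : ts.getD ((lo + hi) / 2) 0 < x
      · rw [if_pos hc]
        have hc' : ts[(lo + hi) / 2] < x := by
          simpa [List.getD_eq_getElem?_getD, List.getElem?_eq_getElem hmid] using hc
        apply ih ((lo + hi) / 2 + 1) hi (by omega) (by omega) hhi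
        · intro i hi' hiLt
          have hle2 : ts[i] ≤ ts[(lo + hi) / 2] := by
            rcases Nat.lt_or_ge i ((lo + hi) / 2) with hc2 | hc2
            · exact hmono i ((lo + hi) / 2) hi' hmid hc2
            · have hieq : i = (lo + hi) / 2 := by omega
              simp [hieq]
          omega
        · exact hhi'
      · rw [if_neg hc]
        have hc' : x ≤ ts[(lo + hi) / 2] := by
          have hg := hc
          simp only [List.getD_eq_getElem?_getD, List.getElem?_eq_getElem hmid,
            Option.getD_some, not_lt] at hg
          exact hg
        apply ih lo ((lo + hi) / 2) (by omega) (by omega) (by omega) hlo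
        intro i hi' hiGe
        rcases Nat.lt_or_ge ((lo + hi) / 2) i with hc2 | hc2
        · exact hc'.trans (hmono ((lo + hi) / 2) i hmid hi' hc2)
        · have hieq : i = (lo + hi) / 2 := by omega
          simpa [hieq] using hc'
    · rw [if_neg h]
      have heq : lo = hi := by omega
      subst heq
      exact (countP_eq_of_cut ts x lo hhi hlo hhi').symm

-- The two counts are complements: countP(≥ x) = length − countP(< x).
lemma countP_ge_eq (ts : List Int) (x : Int) :
    ts.countP (fun y => decide (x ≤ y)) = ts.length - ts.countP (fun y => decide (y < x)) := by
  have h := List.length_eq_countP_add_countP (fun y => decide (y < x)) (l := ts)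
  have he : ts.countP (fun y => decide (x ≤ y))
      = ts.countP (fun a => decide ¬decide (a < x) = true) := by
    apply List.countP_congr
    intro a _
    simp [not_lt]
  rw [he]
  omega

-- The head read by the clamp is a member of a nonempty list.
lemma pyGetD_zero_mem (t : List Int) (h : t ≠ []) : PySem.List.pyGetD t 0 0 ∈ t := by
  cases t with
  | nil => exact absurd rfl h
  | cons a l =>
    have : PySem.List.pyGetD (a :: l) 0 0 = a := by
      simp [PySem.List.pyGetD, PySem.List.pyGet?, PySem.List.pyIdx?]
    simp [this]

-- If every element is below x the search runs off the right end.
lemma bisectLoop_all_lt (ts : List Int) (x : Int)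
    (hall : ∀ i (h : i < ts.length), ts[i] < x) :
    ∀ (fuel lo hi : Nat), hi - lo ≤ fuel → lo ≤ hi → hi ≤ ts.length →
      bisectLoop ts x fuel lo hi = hi := by
  intro fuel
  induction fuel with
  | zero =>
    intro lo hi hf hlh hhi
    have heq : lo = hi := by omega
    simp [bisectLoop, heq]
  | succ fuel ih =>
    intro lo hi hf hlh hhi
    simp only [bisectLoop]
    by_cases h : lo < hi
    · rw [if_pos h]
      have hmid : (lo + hi) / 2 < ts.length := by omega
      have hc : ts.getD ((lo + hi) / 2) 0 < x := by
        simpa [List.getD_eq_getElem?_getD, List.getElem?_eq_getElem hmid] using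
          hall ((lo + hi) / 2) hmid
      rw [if_pos hc]
      exact ih ((lo + hi) / 2 + 1) hi (by omega) (by omega) hhi
    · rw [if_neg h]
      omega

-- If every element is at/above x the search stays at the left end.
lemma bisectLoop_all_ge (ts : List Int) (x : Int)
    (hall : ∀ i (h : i < ts.length), x ≤ ts[i]) :
    ∀ (fuel lo hi : Nat), hi - lo ≤ fuel → lo ≤ hi → hi ≤ ts.length →
      bisectLoop ts x fuel lo hi = lo := by
  intro fuel
  induction fuel with
  | zero =>
    intro lo hi hf hlh hhi
    simp [bisectLoop]
  | succ fuel ih =>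
    intro lo hi hf hlh hhi
    simp only [bisectLoop]
    by_cases h : lo < hi
    · rw [if_pos h]
      have hmid : (lo + hi) / 2 < ts.length := by omega
      have hc : ¬ ts.getD ((lo + hi) / 2) 0 < x := by
        simpa [List.getD_eq_getElem?_getD, List.getElem?_eq_getElem hmid, not_lt] using
          hall ((lo + hi) / 2) hmid
      rw [if_neg hc]
      exact ih lo ((lo + hi) / 2) (by omega) (by omega) (by omega)
    · rw [if_neg h]

-- ===== VERDICT (by name: the statement is the Claim_ definition above) =====
theorem calc_eqs_unfiltered_spec : Claim_equal_calc_eqs_unfiltered := by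
  intro t e p _ hpre
  obtain ⟨hne, hcase⟩ := hpre
  show calc_eqs_unfiltered t e p = calc_eqs_unfiltered_alt t e p
  simp only [calc_eqs_unfiltered, calc_eqs_unfiltered_alt]
  rw [countA_eq]
  have hmax : max p (PySem.List.pyGetD t 0 0)
      = if p ≤ PySem.List.pyGetD t 0 0 then PySem.List.pyGetD t 0 0 else p := max_def p _
  rw [hmax]
  set psy : Int := if p ≤ PySem.List.pyGetD t 0 0 then PySem.List.pyGetD t 0 0 else p with hpsy
  suffices hA : ((t.countP (fun y => decide (psy ≤ y)) : Nat) : Int)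
      = (t.length : Int) - ((bisectLoop t psy t.length 0 t.length : Nat) : Int) by
    rw [hA]
  have ht0 : PySem.List.pyGetD t 0 0 ∈ t := pyGetD_zero_mem t hne
  rcases hcase with hs | hlt | hge
  · -- sorted: binary search finds the number of elements below psy
    have hbl : bisectLoop t psy t.length 0 t.length = t.countP (fun y => decide (y < psy)) :=
      bisectLoop_eq_countP t psy hs t.length 0 t.length (by omega) (Nat.zero_le _) le_rfl
        (fun i h hlt => absurd hlt (Nat.not_lt_zero i))
        (fun i h hle => absurd h (Nat.not_lt.mpr hle))
    have hcP : t.countP (fun y => decide (y < psy)) ≤ t.length := List.countP_le_length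
    rw [hbl, countP_ge_eq, Nat.cast_sub hcP]
  · -- every point is before the start year: count 0, search returns the length
    have hlt' : ∀ y ∈ t, y < psy := by
      intro y hy
      rw [hpsy]
      split_ifs with hif
      · exact absurd (lt_of_lt_of_le (hlt _ ht0) hif) (lt_irrefl _)
      · exact hlt y hy
    have hc0 : t.countP (fun y => decide (psy ≤ y)) = 0 := by
      apply List.countP_eq_zero.mpr
      intro a ha
      simpa using not_le.mpr (hlt' a ha)
    have hbl : bisectLoop t psy t.length 0 t.length = t.length :=
      bisectLoop_all_lt t psy (fun i h => hlt' t[i] (List.getElem_mem h))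
        t.length 0 t.length (by omega) (Nat.zero_le _) le_rfl
    rw [hc0, hbl]
    omega
  · -- every point is at/after the clamped start year: count len, search returns 0
    have hge' : ∀ y ∈ t, psy ≤ y := by
      intro y hy
      rw [hpsy]
      split_ifs
      · exact (hge y hy).2
      · exact (hge y hy).1
    have hcL : t.countP (fun y => decide (psy ≤ y)) = t.length := by
      apply List.countP_eq_length.mpr
      intro a ha
      simpa using hge' a ha
    have hbl : bisectLoop t psy t.length 0 t.length = 0 :=
      bisectLoop_all_ge t psy (fun i h => hge' t[i] (List.getElem_mem h))
        t.length 0 t.length (by omega) (Nat.zero_le _) le_rfl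
    rw [hcL, hbl]
    omega
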